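-- pv_equiv track=rewrite | github.com/sujitkc/rap | match-applications-reviewers.py | get_faculty_applications
-- ===== SOURCE A (Python) =====
-- def get_faculty_applications(fac, ft, at):
--   def my_lambda(fao):
--     # fao is a tuple (fac, app, overlap)
--     f, a, o = fao
--     # f = faculty name
--     # a = applicant
--     # o = list of common topics
--     return len(o)
--
--   fac_app = []
--   for app in at:
--     overlap = ft[fac].intersection(at[app])
--     # ft[fac] is the list of topics of fac (faculty)
--     # at[app] is the list of topics of app (applicant)
--     # overlap is the list of common topics bw faculty and applicant
--     if(len(overlap) != 0):
--       fac_app.append((fac, app, overlap))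
--   fac_app.sort(key = my_lambda, reverse = True)
--   # fac_app is a list of tuples sorted according to no of topics in descending order
--   return fac_app
-- ===== SOURCE B (Python) =====
-- def get_faculty_applications(fac, ft, at):
--   # Counting/bucket approach: distribute tuples into buckets indexed by overlap
--   # size and concatenate buckets from largest size down (no comparison sort).
--   ftopics = ft.get(fac, set())
--   kept = [(ftopics.intersection(topics), app) for app, topics in at.items()
--           if ftopics.intersection(topics)]
--   maxn = 0
--   for o, _ in kept:
--     maxn = max(maxn, len(o))
--   buckets = [[] for _ in range(maxn + 1)]
--   for o, app in kept:
--     buckets[len(o)].append((fac, app, o))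
--   out = []
--   for bucket in reversed(buckets):
--     out += bucket
--   return out
-- ===== Notes on version B (the rewrite author's own statement) =====
-- stated objective: alternative
-- what changed: B replaces A's key-based comparison sort by a counting/bucket sort: the faculty's topic set is looked up once, the kept (overlap, applicant) pairs are distributed into an array of buckets indexed by overlap size, and the result is the concatenation of the buckets from the largest size down; no comparison sort is performed.
import Mathlib
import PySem

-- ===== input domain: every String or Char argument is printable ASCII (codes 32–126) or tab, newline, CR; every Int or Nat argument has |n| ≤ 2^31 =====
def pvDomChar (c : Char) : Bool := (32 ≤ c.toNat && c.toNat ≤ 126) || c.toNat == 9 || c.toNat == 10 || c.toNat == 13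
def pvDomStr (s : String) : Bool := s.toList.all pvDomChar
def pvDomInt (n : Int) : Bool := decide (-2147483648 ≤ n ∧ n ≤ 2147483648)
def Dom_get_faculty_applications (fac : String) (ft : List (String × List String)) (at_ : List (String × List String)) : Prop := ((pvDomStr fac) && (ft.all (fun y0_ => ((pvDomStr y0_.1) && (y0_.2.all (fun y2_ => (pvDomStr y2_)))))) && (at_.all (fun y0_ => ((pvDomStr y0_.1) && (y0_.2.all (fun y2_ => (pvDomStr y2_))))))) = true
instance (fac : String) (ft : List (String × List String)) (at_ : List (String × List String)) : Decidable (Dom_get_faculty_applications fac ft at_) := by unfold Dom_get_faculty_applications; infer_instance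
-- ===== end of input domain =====

-- B replaces the comparison sort by a counting/bucket sort over an array of buckets
-- indexed by overlap size, concatenated largest-first (objective: alternative; return value only).

-- ===== PORT A =====
def get_faculty_applications (fac : String) (ft : List (String × List String)) (at_ : List (String × List String)) : List (String × String × List String) :=
  let ftd := PySem.Dict.ofList ft
  let atd := PySem.Dict.ofList at_
  -- 'for app in at: overlap = ft[fac].intersection(at[app]); if len(overlap) != 0: append'
  -- ft[fac] is totalized as getD fac [] — Pre_ restricts to inputs where Python does not raise KeyError
  let fac_app := atd.keys.foldl (fun acc app =>
      let overlap := PySem.Set.inter (ftd.getD fac []) (atd.getD app [])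
      if overlap.length ≠ 0 then acc ++ [(fac, app, overlap)] else acc) []
  -- fac_app.sort(key = my_lambda, reverse = True)
  PySem.List.sorted fac_app (fun fao => (fao.2.2.length : Int)) true

-- ===== PORT B =====
-- buckets[len(o)].append((fac, app, o))
def pvBucketPut (bs : List (List (String × String × List String))) (i : Nat)
    (x : String × String × List String) : List (List (String × String × List String)) :=
  bs.set i (bs.getD i [] ++ [x])

def get_faculty_applications_alt (fac : String) (ft : List (String × List String)) (at_ : List (String × List String)) : List (String × String × List String) :=
  -- ftopics = ft.get(fac, set())
  let ftopics := (PySem.Dict.ofList ft).getD fac []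
  -- kept = [(ftopics.intersection(topics), app) for app, topics in at.items() if …]
  let kept := (PySem.Dict.ofList at_).items.flatMap (fun p =>
      let ov := PySem.Set.inter ftopics p.2
      if ov.length ≠ 0 then [(ov, p.1)] else [])
  -- maxn = running max of the kept overlap sizes
  let maxn := kept.foldl (fun m q => max m q.1.length) 0
  -- buckets = [[] for _ in range(maxn + 1)]; buckets[len(o)].append(...)
  let buckets := kept.foldl (fun bs q => pvBucketPut bs q.1.length (fac, q.2, q.1))
      (List.replicate (maxn + 1) [])
  -- out = []; for bucket in reversed(buckets): out += bucket
  buckets.reverse.foldl (fun out b => out ++ b) []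

-- ===== PRECONDITION & SPEC =====
-- Pre_ excludes exactly the inputs on which Python A raises KeyError: fac missing from ft
-- while the applicant dict is nonempty (with an empty 'at' the loop body never runs).
-- (On those excluded inputs B itself returns [], since it reads the topics with a defaulted get.)
def Pre_get_faculty_applications (fac : String) (ft : List (String × List String)) (at_ : List (String × List String)) : Prop :=
  at_ = [] ∨ (PySem.Dict.ofList ft).contains fac = true
instance (fac : String) (ft : List (String × List String)) (at_ : List (String × List String)) : Decidable (Pre_get_faculty_applications fac ft at_) := by unfold Pre_get_faculty_applications; infer_instance

def pvWitness_get_faculty_applications : String × (List (String × List String)) × (List (String × List String)) :=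
  ("f", [("f", ["x", "y"])], [("a", ["y", "z"]), ("b", ["q"]), ("c", ["x", "y"])])

def Spec_get_faculty_applications (fac : String) (ft : List (String × List String)) (at_ : List (String × List String)) (out : List (String × String × List String)) : Prop := out = get_faculty_applications_alt fac ft at_
instance (fac : String) (ft : List (String × List String)) (at_ : List (String × List String)) (out : List (String × String × List String)) : Decidable (Spec_get_faculty_applications fac ft at_ out) := by unfold Spec_get_faculty_applications; infer_instance

-- ===== CLAIM (what is proved, stated in full; the proofs are below) =====
def Claim_equal_get_faculty_applications : Prop := ∀ (fac : String) (ft : List (String × List String)) (at_ : List (String × List String)), Dom_get_faculty_applications fac ft at_ → Pre_get_faculty_applications fac ft at_ → Spec_get_faculty_applications fac ft at_ (get_faculty_applications fac ft at_)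
-- ===== LEMMAS AND PROOFS =====

-- A's append-if loop emits the flatMap of singleton-or-nothing per applicant.
theorem pv_foldl_if_emit {β α : Type} (c : β → Prop) [DecidablePred c] (t : β → α)
    (l : List β) (acc : List α) :
    l.foldl (fun acc x => if c x then acc ++ [t x] else acc) acc
      = acc ++ l.flatMap (fun x => if c x then [t x] else []) := by
  induction l generalizing acc with
  | nil => simp
  | cons y ys ih => by_cases h : c y <;> simp [h, ih]

-- A's emitted tuple list is B's kept list of (overlap, applicant) pairs, tupled up.
theorem pv_emit_eq (fac : String) (ft at_ : List (String × List String)) :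
    (PySem.Dict.ofList at_).keys.foldl (fun acc app =>
        if (PySem.Set.inter ((PySem.Dict.ofList ft).getD fac []) ((PySem.Dict.ofList at_).getD app [])).length ≠ 0
        then acc ++ [(fac, app, PySem.Set.inter ((PySem.Dict.ofList ft).getD fac []) ((PySem.Dict.ofList at_).getD app []))]
        else acc) []
    = ((PySem.Dict.ofList at_).items.flatMap (fun p =>
        if (PySem.Set.inter ((PySem.Dict.ofList ft).getD fac []) p.2).length ≠ 0
        then [(PySem.Set.inter ((PySem.Dict.ofList ft).getD fac []) p.2, p.1)] else [])).map
        (fun q => (fac, q.2, q.1)) := by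
  rw [pv_foldl_if_emit
      (fun app => (PySem.Set.inter ((PySem.Dict.ofList ft).getD fac []) ((PySem.Dict.ofList at_).getD app [])).length ≠ 0)
      (fun app => (fac, app, PySem.Set.inter ((PySem.Dict.ofList ft).getD fac []) ((PySem.Dict.ofList at_).getD app []))),
    List.nil_append]
  simp only [PySem.Dict.keys, List.flatMap_map, List.map_flatMap]
  refine List.flatMap_congr (fun p hp => ?_)
  have hp' : (p.1, p.2) ∈ (PySem.Dict.ofList at_).items := by simpa using hp
  have hv : (PySem.Dict.ofList at_).getD p.1 [] = p.2 :=
    PySem.Dict.getD_of_mem_items _ hp' (PySem.Dict.nodup_keys_ofList at_) []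
  rw [hv]
  split <;> simp

-- getD through a set at an in-range index.
theorem pv_getD_set {α : Type} (l : List (List α)) (i : Nat) (v : List α) (j : Nat)
    (h : i < l.length) :
    (l.set i v).getD j [] = if j = i then v else l.getD j [] := by
  simp only [List.getD_eq_getElem?_getD, List.getElem?_set]
  rcases eq_or_ne i j with rfl | hne
  · simp [h]
  · simp [hne, Ne.symm hne]

-- The bucket loop preserves the number of buckets.
theorem pv_bucket_len {α : Type} (k : α → Nat) :
    ∀ (L : List α) (bs : List (List α)),
    (L.foldl (fun bs a => bs.set (k a) (bs.getD (k a) [] ++ [a])) bs).length = bs.length := by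
  intro L
  induction L with
  | nil => intro bs; rfl
  | cons a L ih => intro bs; rw [List.foldl_cons, ih, List.length_set]

-- Bucket j of the bucket loop holds exactly the key-j elements, appended in order.
theorem pv_bucket_getD {α : Type} (k : α → Nat) :
    ∀ (L : List α) (bs : List (List α)), (∀ a ∈ L, k a < bs.length) → ∀ j : Nat,
    (L.foldl (fun bs a => bs.set (k a) (bs.getD (k a) [] ++ [a])) bs).getD j []
      = bs.getD j [] ++ L.filter (fun a => k a == j) := by
  intro L
  induction L with
  | nil => intro bs _ j; simp
  | cons a L ih =>
    intro bs h j
    have ha : k a < bs.length := h a (List.mem_cons_self ..)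
    rw [List.foldl_cons,
      ih _ (fun x hx => by rw [List.length_set]; exact h x (List.mem_cons_of_mem _ hx)) j,
      pv_getD_set bs (k a) _ j ha, List.filter_cons]
    rcases eq_or_ne j (k a) with rfl | hne
    · simp
    · simp [Ne.symm hne, hne]

-- Starting from empty buckets, the bucket loop IS the per-key filter table.
theorem pv_bucket_eq {α : Type} (k : α → Nat) (L : List α) (n : Nat)
    (h : ∀ a ∈ L, k a < n) :
    L.foldl (fun bs a => bs.set (k a) (bs.getD (k a) [] ++ [a])) (List.replicate n ([] : List α))
      = (List.range n).map (fun j => L.filter (fun a => k a == j)) := by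
  apply List.ext_getElem
  · rw [pv_bucket_len]; simp
  · intro i h1 h2
    have hi : i < n := by rw [pv_bucket_len] at h1; simpa using h1
    rw [← List.getD_eq_getElem _ [] h1, ← List.getD_eq_getElem _ [] h2,
      pv_bucket_getD k L _ (by simpa using h) i]
    simp [List.getD_eq_getElem?_getD, hi]

-- flatMap drops keys with empty groups.
theorem pv_flatMap_filter_ne {β α : Type} (G : β → List α) :
    ∀ l : List β, l.flatMap G = (l.filter (fun n => !(G n).isEmpty)).flatMap G := by
  intro l
  induction l with
  | nil => rfl
  | cons a l ih =>
    by_cases h : G a = [] <;>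
      simp [h, List.flatMap_cons, ih.symm]

-- Two strictly descending Int lists with the same members are equal.
theorem pv_desc_ext : ∀ (K1 K2 : List Int), K1.Pairwise (fun a b => b < a) →
    K2.Pairwise (fun a b => b < a) → (∀ v, v ∈ K1 ↔ v ∈ K2) → K1 = K2 := by
  intro K1
  induction K1 with
  | nil =>
    intro K2 _ _ hm
    cases K2 with
    | nil => rfl
    | cons b t => exact absurd ((hm b).2 (by simp)) (by simp)
  | cons a t1 ih =>
    intro K2 h1 h2 hm
    cases K2 with
    | nil => exact absurd ((hm a).1 (by simp)) (by simp)
    | cons b t2 =>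
      have hnt1 : ∀ x ∈ t1, x < a := fun x hx => List.rel_of_pairwise_cons h1 hx
      have hnt2 : ∀ x ∈ t2, x < b := fun x hx => List.rel_of_pairwise_cons h2 hx
      have hab : a = b := by
        rcases List.mem_cons.1 ((hm a).1 (by simp)) with h | h
        · exact h
        · rcases List.mem_cons.1 ((hm b).2 (by simp)) with h' | h'
          · exact h'.symm
          · have := hnt2 _ h
            have := hnt1 _ h'
            omega
      subst hab
      have ht : t1 = t2 := by
        refine ih t2 h1.of_cons h2.of_cons (fun v => ⟨fun hv => ?_, fun hv => ?_⟩)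
        · rcases List.mem_cons.1 ((hm v).1 (List.mem_cons_of_mem _ hv)) with rfl | h
          · exact absurd (hnt1 _ hv) (lt_irrefl v)
          · exact h
        · rcases List.mem_cons.1 ((hm v).2 (List.mem_cons_of_mem _ hv)) with rfl | h
          · exact absurd (hnt2 _ hv) (lt_irrefl v)
          · exact h
      rw [ht]

theorem pv_insertBy_nil {α : Type} (before : α → α → Bool) (x : α) :
    PySem.List.insertBy before x [] = [x] := rfl

theorem pv_insertBy_cons {α : Type} (before : α → α → Bool) (x y : α) (ys : List α) :
    PySem.List.insertBy before x (y :: ys)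
      = if before x y then x :: y :: ys else y :: PySem.List.insertBy before x ys := rfl

theorem pv_insertBy_skip {α : Type} (before : α → α → Bool) (x : α) (ys zs : List α)
    (h : ∀ y ∈ ys, before x y = false) :
    PySem.List.insertBy before x (ys ++ zs) = ys ++ PySem.List.insertBy before x zs := by
  induction ys with
  | nil => simp
  | cons y t ih =>
    have hy := h y (by simp)
    simp [pv_insertBy_cons, hy, ih (fun z hz => h z (by simp [hz]))]

theorem pv_insertBy_front {α : Type} (before : α → α → Bool) (x : α) (zs : List α)
    (h : ∀ z ∈ zs, before x z = true) :
    PySem.List.insertBy before x zs = x :: zs := by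
  cases zs with
  | nil => rfl
  | cons z t => simp [pv_insertBy_cons, h z (by simp)]

-- Inserting x into the concatenation of strictly-descending groups, when its key already
-- has a group: x lands at the end of its group.
theorem pv_ins_mem {α : Type} (k : α → Int) (x : α) (G : Int → List α)
    (hG : ∀ n, ∀ y ∈ G n, k y = n) :
    ∀ ks : List Int, ks.Pairwise (fun a b => b < a) → k x ∈ ks →
    PySem.List.insertBy (fun a b => decide (k b < k a)) x (ks.flatMap G)
      = ks.flatMap (fun n => if n = k x then G n ++ [x] else G n) := by
  intro ks
  induction ks with
  | nil => simp
  | cons n t ih =>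
    intro hp hmem
    have hnt : ∀ b ∈ t, b < n := fun b hb => List.rel_of_pairwise_cons hp hb
    have hpt : t.Pairwise (fun a b => b < a) := hp.of_cons
    by_cases hn : n = k x
    · subst hn
      have hxt : k x ∉ t := fun h => absurd (hnt _ h) (lt_irrefl _)
      have h1 : ∀ y ∈ G (k x), (fun a b => decide (k b < k a)) x y = false := by
        intro y hy; simp [hG _ y hy]
      have h2 : ∀ z ∈ t.flatMap G, (fun a b => decide (k b < k a)) x z = true := by
        intro z hz
        rcases List.mem_flatMap.1 hz with ⟨m, hm, hzm⟩
        simp [hG _ z hzm, hnt _ hm]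
      rw [List.flatMap_cons, pv_insertBy_skip _ _ _ _ h1, pv_insertBy_front _ _ _ h2]
      have ht : t.flatMap (fun n => if n = k x then G n ++ [x] else G n) = t.flatMap G :=
        List.flatMap_congr (fun m hm => by
          have : m ≠ k x := fun h => hxt (h ▸ hm)
          simp [this])
      simp [ht]
    · have hmt : k x ∈ t := by
        rcases List.mem_cons.1 hmem with h | h
        · exact absurd h.symm hn
        · exact h
      have hlt : k x < n := hnt _ hmt
      have h1 : ∀ y ∈ G n, (fun a b => decide (k b < k a)) x y = false := by
        intro y hy
        simp [hG _ y hy]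
        omega
      rw [List.flatMap_cons, pv_insertBy_skip _ _ _ _ h1, ih hpt hmt]
      simp [hn]

-- Inserting x whose key has no group yet: a new singleton group appears where the key
-- is inserted into the descending key list.
theorem pv_ins_not_mem {α : Type} (k : α → Int) (x : α) (G : Int → List α)
    (hG : ∀ n, ∀ y ∈ G n, k y = n) :
    ∀ ks : List Int, ks.Pairwise (fun a b => b < a) → k x ∉ ks →
    PySem.List.insertBy (fun a b => decide (k b < k a)) x (ks.flatMap G)
      = (PySem.List.insertBy (fun a b => decide (b < a)) (k x) ks).flatMap
          (fun n => if n = k x then [x] else G n) := by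
  intro ks
  induction ks with
  | nil => simp [pv_insertBy_nil]
  | cons n t ih =>
    intro hp hmem
    have hnt : ∀ b ∈ t, b < n := fun b hb => List.rel_of_pairwise_cons hp hb
    have hpt : t.Pairwise (fun a b => b < a) := hp.of_cons
    have hne : n ≠ k x := fun h => hmem (by simp [h])
    have hmemt : k x ∉ t := fun h => hmem (by simp [h])
    by_cases hlt : n < k x
    · have h2 : ∀ z ∈ (n :: t).flatMap G, (fun a b => decide (k b < k a)) x z = true := by
        intro z hz
        rcases List.mem_flatMap.1 hz with ⟨m, hm, hzm⟩
        rcases List.mem_cons.1 hm with rfl | hm'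
        · simp [hG _ z hzm, hlt]
        · have := hnt _ hm'
          simp [hG _ z hzm]
          omega
      rw [pv_insertBy_front _ _ _ h2, pv_insertBy_cons]
      simp only [hlt, decide_true, if_true]
      have ht : ∀ m ∈ n :: t, (if m = k x then [x] else G m) = G m := by
        intro m hm
        have : m ≠ k x := by
          rcases List.mem_cons.1 hm with rfl | hm'
          · exact hne
          · have := hnt _ hm'; omega
        simp [this]
      simp [List.flatMap_congr ht]
    · have h1 : ∀ y ∈ G n, (fun a b => decide (k b < k a)) x y = false := by
        intro y hy
        simp [hG _ y hy]
        omega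
      rw [List.flatMap_cons, pv_insertBy_skip _ _ _ _ h1, ih hpt hmemt, pv_insertBy_cons]
      simp [hlt, hne]

theorem pv_sorted_set_desc (M : List Int) :
    (PySem.List.sorted (PySem.Set.ofList M) (fun x => x) true).Pairwise (fun a b => b < a) := by
  have h1 := PySem.List.sorted_pairwise_rev (PySem.Set.ofList M) (fun x => x)
  have h2 : (PySem.List.sorted (PySem.Set.ofList M) (fun x => x) true).Nodup :=
    ((PySem.List.sorted_perm (PySem.Set.ofList M) (fun x => x) true).nodup_iff).2
      (PySem.Set.nodup_ofList M)
  exact (h1.and h2).imp (fun h => lt_of_le_of_ne h.1 (fun e => h.2 e.symm))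

-- The stable descending sort is the concatenation, over the distinct keys sorted
-- descending, of the key-preimages in original order.
theorem pv_sorted_rev_eq_flatMap {α : Type} (k : α → Int) (L : List α) :
    PySem.List.sorted L k true
      = (PySem.List.sorted (PySem.Set.ofList (L.map k)) (fun x => x) true).flatMap
          (fun v => L.filter (fun a => decide (k a = v))) := by
  induction L using List.reverseRecOn with
  | nil => rfl
  | append_singleton L x IH =>
    have hG : ∀ n, ∀ y ∈ L.filter (fun a => decide (k a = n)), k y = n := by
      intro n y hy
      exact of_decide_eq_true (List.mem_filter.1 hy).2
    have hsort : PySem.List.sorted (L ++ [x]) k true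
        = PySem.List.insertBy (fun a b => decide (k b < k a)) x (PySem.List.sorted L k true) := by
      rw [PySem.List.sorted_rev_eq_foldl_insertBy, PySem.List.sorted_rev_eq_foldl_insertBy,
        List.foldl_append]
      rfl
    have hofl : PySem.Set.ofList ((L ++ [x]).map k)
        = PySem.Set.add (PySem.Set.ofList (L.map k)) (k x) := by
      rw [List.map_append, PySem.Set.ofList_eq_foldl, List.foldl_append,
        ← PySem.Set.ofList_eq_foldl]
      rfl
    by_cases hmem : k x ∈ PySem.Set.ofList (L.map k)
    · have hc : (PySem.Set.ofList (L.map k)).contains (k x) = true := by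
        simpa [PySem.Set.contains, List.contains_eq_mem] using hmem
      have hset : PySem.Set.ofList ((L ++ [x]).map k) = PySem.Set.ofList (L.map k) := by
        rw [hofl]; unfold PySem.Set.add; rw [hc]; simp
      have hks : k x ∈ PySem.List.sorted (PySem.Set.ofList (L.map k)) (fun x => x) true :=
        ((PySem.List.sorted_perm _ _ _).mem_iff).2 hmem
      rw [hsort, IH, pv_ins_mem k x _ hG _ (pv_sorted_set_desc _) hks, hset]
      refine List.flatMap_congr (fun n hn => ?_)
      by_cases h : n = k x
      · subst h; simp [List.filter_append]
      · simp [h, Ne.symm h, List.filter_append]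
    · have hc : (PySem.Set.ofList (L.map k)).contains (k x) = false := by
        simpa [PySem.Set.contains, List.contains_eq_mem] using hmem
      have hset : PySem.Set.ofList ((L ++ [x]).map k)
          = PySem.Set.ofList (L.map k) ++ [k x] := by
        rw [hofl]; unfold PySem.Set.add; rw [hc]; simp
      have hks : k x ∉ PySem.List.sorted (PySem.Set.ofList (L.map k)) (fun x => x) true :=
        fun h => hmem (((PySem.List.sorted_perm _ _ _).mem_iff).1 h)
      have hnotL : k x ∉ L.map k := fun h => hmem ((PySem.Set.mem_ofList _ _).2 h)
      have hkssort : PySem.List.sorted (PySem.Set.ofList ((L ++ [x]).map k)) (fun x => x) true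
          = PySem.List.insertBy (fun a b => decide (b < a)) (k x)
              (PySem.List.sorted (PySem.Set.ofList (L.map k)) (fun x => x) true) := by
        rw [hset, PySem.List.sorted_rev_eq_foldl_insertBy, PySem.List.sorted_rev_eq_foldl_insertBy,
          List.foldl_append]
        rfl
      rw [hsort, IH, pv_ins_not_mem k x _ hG _ (pv_sorted_set_desc _) hks, hkssort]
      refine List.flatMap_congr (fun n hn => ?_)
      rcases (PySem.List.insertBy_mem_iff _ _ _ _).1 hn with h | h
      · subst h
        have hnil : L.filter (fun a => decide (k a = k x)) = [] :=
          List.filter_eq_nil_iff.2 (fun a ha => by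
            simp only [decide_eq_true_eq]
            exact fun e => hnotL (e ▸ List.mem_map_of_mem ha))
        simp [List.filter_append, hnil]
      · have hnekx : n ≠ k x := fun e => hks (e ▸ h)
        simp [hnekx, Ne.symm hnekx, List.filter_append]

-- The stable descending sort by a Nat-valued key equals the concatenated bucket table
-- read back-to-front.
theorem pv_sorted_eq_buckets {α : Type} (k : α → Nat) (T : List α) (n : Nat)
    (h : ∀ a ∈ T, k a ≤ n) :
    PySem.List.sorted T (fun a => ((k a : Nat) : Int)) true
      = ((T.foldl (fun bs a => bs.set (k a) (bs.getD (k a) [] ++ [a]))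
            (List.replicate (n + 1) ([] : List α))).reverse).foldl (fun out b => out ++ b) [] := by
  rw [PySem.List.foldl_append_eq_flatten, List.nil_append,
    pv_bucket_eq k T (n + 1) (fun a ha => Nat.lt_succ_of_le (h a ha)),
    ← List.map_reverse, ← List.flatMap_def,
    pv_sorted_rev_eq_flatMap (fun a => ((k a : Nat) : Int)) T]
  have hcast : (List.range (n + 1)).reverse.flatMap (fun j => T.filter (fun a => k a == j))
      = ((List.range (n + 1)).reverse.map (fun j : Nat => (j : Int))).flatMap
          (fun v => T.filter (fun a => decide (((k a : Nat) : Int) = v))) := by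
    rw [List.flatMap_map]
    refine List.flatMap_congr (fun j _ => List.filter_congr (fun a _ => ?_))
    show (k a == j) = decide (((k a : Nat) : Int) = (j : Int))
    by_cases h : k a = j <;> simp [h]
  rw [hcast, pv_flatMap_filter_ne, pv_flatMap_filter_ne
    (l := (List.range (n + 1)).reverse.map (fun j : Nat => (j : Int)))]
  have hKdesc := pv_sorted_set_desc (T.map (fun a => ((k a : Nat) : Int)))
  have hRdesc : ((List.range (n + 1)).reverse.map (fun j : Nat => (j : Int))).Pairwise
      (fun a b => b < a) := by
    refine List.pairwise_map.2 ?_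
    refine (List.pairwise_reverse.2 ?_)
    exact List.pairwise_lt_range.imp (fun hab => by exact_mod_cast hab)
  refine congrArg (fun l : List Int =>
    l.flatMap (fun v => T.filter (fun a => decide (((k a : Nat) : Int) = v)))) ?_
  refine pv_desc_ext _ _ (hKdesc.filter _) (hRdesc.filter _) (fun v => ?_)
  have hne : ∀ w : List α, (!w.isEmpty) = true ↔ w ≠ [] := by
    intro w; cases w <;> simp
  have hGmem : T.filter (fun a => decide (((k a : Nat) : Int) = v)) ≠ [] ↔
      ∃ a ∈ T, ((k a : Nat) : Int) = v := by
    rw [Ne, List.filter_eq_nil_iff]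
    push Not
    simp
  constructor
  · intro hv
    rcases List.mem_filter.1 hv with ⟨_, h2⟩
    refine List.mem_filter.2 ⟨?_, h2⟩
    rcases hGmem.1 ((hne _).1 h2) with ⟨a, haT, hav⟩
    refine List.mem_map.2 ⟨k a, ?_, hav⟩
    rw [List.mem_reverse, List.mem_range]
    exact Nat.lt_succ_of_le (h a haT)
  · intro hv
    rcases List.mem_filter.1 hv with ⟨_, h2⟩
    refine List.mem_filter.2 ⟨?_, h2⟩
    rcases hGmem.1 ((hne _).1 h2) with ⟨a, haT, hav⟩
    rw [((PySem.List.sorted_perm _ _ _).mem_iff), PySem.Set.mem_ofList]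
    exact List.mem_map.2 ⟨a, haT, hav⟩

-- B's let-chain (max, buckets, reversed concatenation) computes the stable descending
-- sort of its kept tuples.
theorem pv_B_shape (fac : String) (kept : List (List String × String)) :
    ((kept.foldl (fun bs q => pvBucketPut bs q.1.length (fac, q.2, q.1))
        (List.replicate ((kept.foldl (fun m q => max m q.1.length) 0) + 1) [])).reverse).foldl
        (fun out b => out ++ b) []
    = PySem.List.sorted (kept.map (fun q => (fac, q.2, q.1)))
        (fun fao => (fao.2.2.length : Int)) true := by
  have hT : ∀ a ∈ kept.map (fun q => (fac, q.2, q.1)),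
      a.2.2.length ≤ kept.foldl (fun m q => max m q.1.length) 0 := by
    intro a ha
    rcases List.mem_map.1 ha with ⟨q, hq, rfl⟩
    exact (PySem.List.le_foldl_max_nat kept (fun q => q.1.length) 0).2 q hq
  have hfold : kept.foldl (fun bs q => pvBucketPut bs q.1.length (fac, q.2, q.1))
        (List.replicate ((kept.foldl (fun m q => max m q.1.length) 0) + 1) [])
      = (kept.map (fun q => (fac, q.2, q.1))).foldl
          (fun bs a => bs.set a.2.2.length (bs.getD a.2.2.length [] ++ [a]))
          (List.replicate ((kept.foldl (fun m q => max m q.1.length) 0) + 1) []) :=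
    (List.foldl_map (f := fun q : List String × String => (fac, q.2, q.1))
      (g := fun (bs : List (List (String × String × List String)))
          (a : String × String × List String) =>
        bs.set a.2.2.length (bs.getD a.2.2.length [] ++ [a]))).symm
  rw [hfold]
  exact (pv_sorted_eq_buckets (fun a : String × String × List String => a.2.2.length) _ _ hT).symm

-- ===== VERDICT (by name: the statement is the Claim_ definition above) =====
theorem get_faculty_applications_spec : Claim_equal_get_faculty_applications := by
  intro fac ft at_ _ _
  unfold Spec_get_faculty_applications get_faculty_applications get_faculty_applications_alt
  simp only [pv_emit_eq, pv_B_shape]
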